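-- pv_equiv track=rewrite | github.com/MilenKunchev/My-Codewars-Solutions-Python | Katas/Find the total white and black areas in a strange chessboard.py | white_black_areas
-- ===== SOURCE A (Python) =====
-- def white_black_areas(cs, rs):
--     s_white = 0
--     s_black = 0
--
--     even_row_sum = 0
--     odd_row_sum = 0
--
--     for i in range(0, len(cs), 2):
--         even_row_sum += cs[i]
--
--     for i in range(1, len(cs), 2):
--         odd_row_sum += cs[i]
--
--     for i in range(0, len(rs), 2):
--         s_white += rs[i] * even_row_sum
--
--     for i in range(1, len(rs), 2):
--         s_white += rs[i] * odd_row_sum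
--
--     for i in range(0, len(rs), 2):
--         s_black += rs[i] * odd_row_sum
--
--     for i in range(1, len(rs), 2):
--         s_black += rs[i] * even_row_sum
--
--     return s_white, s_black
-- ===== SOURCE B (Python) =====
-- def white_black_areas(cs, rs):
--     def eo(xs):
--         # one right-to-left pass producing (sum of even-index elems, sum of odd-index elems)
--         e = o = 0
--         for x in reversed(xs):
--             e, o = x + o, e
--         return e, o
--     ec, oc = eo(cs)
--     er, orr = eo(rs)
--     return er * ec + orr * oc, er * oc + orr * ec
-- ===== Notes on version B (the rewrite author's own statement) =====
-- stated objective: simpler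
-- what changed: Replaces A's six step-2 index loops with one right-to-left pass per list computing the (even,odd) index-parity sums, then returns the closed-form bilinear tuple er*ec+or*oc / er*oc+or*ec.
import Mathlib
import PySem

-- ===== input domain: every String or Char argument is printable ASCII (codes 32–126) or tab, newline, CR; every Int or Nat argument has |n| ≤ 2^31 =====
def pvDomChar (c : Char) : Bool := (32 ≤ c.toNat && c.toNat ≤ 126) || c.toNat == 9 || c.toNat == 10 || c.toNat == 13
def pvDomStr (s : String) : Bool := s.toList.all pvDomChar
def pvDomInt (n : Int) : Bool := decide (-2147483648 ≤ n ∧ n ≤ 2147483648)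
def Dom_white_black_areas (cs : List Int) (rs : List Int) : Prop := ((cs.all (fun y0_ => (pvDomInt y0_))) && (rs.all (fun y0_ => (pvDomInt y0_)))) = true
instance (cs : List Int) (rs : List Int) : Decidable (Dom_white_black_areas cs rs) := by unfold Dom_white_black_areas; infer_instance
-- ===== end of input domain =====

-- B replaces A's six step-2 index loops by a single right-to-left pass per list
-- computing the (even-index, odd-index) sums and a closed-form bilinear tuple (objective: simpler).


-- ===== PORT A =====
-- literal transliteration: each 'for i in range(a, len(xs), 2)' loop is a foldl over the
-- step-2 pyRange; xs[i] is PySem.List.pyGetD (the index is always in range here).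
def white_black_areas (cs : List Int) (rs : List Int) : Int × Int :=
  let s_white : Int := 0
  let s_black : Int := 0
  let even_row_sum : Int := 0
  let odd_row_sum : Int := 0
  let even_row_sum := (PySem.List.pyRange 0 (PySem.List.len cs) 2).foldl
    (fun a i => a + PySem.List.pyGetD cs i 0) even_row_sum
  let odd_row_sum := (PySem.List.pyRange 1 (PySem.List.len cs) 2).foldl
    (fun a i => a + PySem.List.pyGetD cs i 0) odd_row_sum
  let s_white := (PySem.List.pyRange 0 (PySem.List.len rs) 2).foldl
    (fun a i => a + PySem.List.pyGetD rs i 0 * even_row_sum) s_white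
  let s_white := (PySem.List.pyRange 1 (PySem.List.len rs) 2).foldl
    (fun a i => a + PySem.List.pyGetD rs i 0 * odd_row_sum) s_white
  let s_black := (PySem.List.pyRange 0 (PySem.List.len rs) 2).foldl
    (fun a i => a + PySem.List.pyGetD rs i 0 * odd_row_sum) s_black
  let s_black := (PySem.List.pyRange 1 (PySem.List.len rs) 2).foldl
    (fun a i => a + PySem.List.pyGetD rs i 0 * even_row_sum) s_black
  (s_white, s_black)

-- ===== PORT B =====
-- 'eo' is Source B's reversed-loop pass: a foldr carrying the state (e, o)
def pvEO (xs : List Int) : Int × Int :=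
  xs.foldr (fun x p => (x + p.2, p.1)) (0, 0)

def white_black_areas_alt (cs : List Int) (rs : List Int) : Int × Int :=
  let ec := (pvEO cs).1
  let oc := (pvEO cs).2
  let er := (pvEO rs).1
  let orr := (pvEO rs).2
  (er * ec + orr * oc, er * oc + orr * ec)

-- ===== PRECONDITION & SPEC =====
def Spec_white_black_areas (cs : List Int) (rs : List Int) (out : Int × Int) : Prop := out = white_black_areas_alt cs rs
instance (cs : List Int) (rs : List Int) (out : Int × Int) : Decidable (Spec_white_black_areas cs rs out) := by unfold Spec_white_black_areas; infer_instance

-- ===== CLAIM (what is proved, stated in full; the proofs are below) =====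
def Claim_equal_white_black_areas : Prop := ∀ (cs : List Int) (rs : List Int), Dom_white_black_areas cs rs → Spec_white_black_areas cs rs (white_black_areas cs rs)

-- ===== LEMMAS AND PROOFS =====

-- proof-side structural split into the even-index and odd-index sublists
def pvSplit (xs : List Int) : List Int × List Int :=
  xs.foldr (fun x p => (x :: p.2, p.1)) ([], [])

theorem pvSplit_cons (x : Int) (xs : List Int) :
    pvSplit (x :: xs) = (x :: (pvSplit xs).2, (pvSplit xs).1) := rfl

theorem pvEO_eq_split (xs : List Int) :
    pvEO xs = ((pvSplit xs).1.sum, (pvSplit xs).2.sum) := by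
  induction xs with
  | nil => rfl
  | cons x t ih => simp [pvEO, pvSplit] at ih ⊢; simp [ih]

-- the step-2 ranges as maps over List.range
theorem pyRange2_zero (n : Nat) :
    PySem.List.pyRange 0 (n : Int) 2 = (List.range ((n + 1) / 2)).map (fun k => ((2 * k : Nat) : Int)) := by
  rw [PySem.List.pyRange_of_pos _ _ (by norm_num)]
  have hcount : (if (0:Int) < n then (((n:Int) - 0 + 2 - 1) / 2).toNat else 0) = (n + 1) / 2 := by
    split_ifs with h <;> omega
  rw [hcount]
  apply List.map_congr_left
  intro k _
  push_cast
  ring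

theorem pyRange2_one (n : Nat) :
    PySem.List.pyRange 1 (n : Int) 2 = (List.range (n / 2)).map (fun k => ((2 * k + 1 : Nat) : Int)) := by
  rw [PySem.List.pyRange_of_pos _ _ (by norm_num)]
  have hcount : (if (1:Int) < n then (((n:Int) - 1 + 2 - 1) / 2).toNat else 0) = n / 2 := by
    split_ifs with h <;> omega
  rw [hcount]
  apply List.map_congr_left
  intro k _
  push_cast
  ring

-- the even/odd index maps are exactly pvSplit's components (two-step structural recursion)
theorem map_even_eq : ∀ (xs : List Int),
    (List.range ((xs.length + 1) / 2)).map (fun k => xs.getD (2 * k) 0) = (pvSplit xs).1 ∧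
    (List.range (xs.length / 2)).map (fun k => xs.getD (2 * k + 1) 0) = (pvSplit xs).2
  | [] => by constructor <;> rfl
  | [x] => by refine ⟨?_, ?_⟩ <;> simp [pvSplit, List.range_succ]
  | x :: y :: t => by
    have iht := map_even_eq t
    have h1 : ((x :: y :: t).length + 1) / 2 = (t.length + 1) / 2 + 1 := by simp; omega
    have h2 : (x :: y :: t).length / 2 = t.length / 2 + 1 := by simp; omega
    constructor
    · rw [h1, List.range_succ_eq_map, List.map_cons, List.map_map]
      have hf : ((fun k => (x :: y :: t).getD (2 * k) 0) ∘ Nat.succ) = fun k => t.getD (2 * k) 0 := by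
        funext k
        have h3 : 2 * Nat.succ k = (2 * k + 1) + 1 := by omega
        simp only [Function.comp, h3, List.getD_cons_succ]
      rw [hf, iht.1]
      simp [pvSplit_cons]
    · rw [h2, List.range_succ_eq_map, List.map_cons, List.map_map]
      have hf : ((fun k => (x :: y :: t).getD (2 * k + 1) 0) ∘ Nat.succ) = fun k => t.getD (2 * k + 1) 0 := by
        funext k
        have h3 : 2 * Nat.succ k + 1 = (2 * k + 2) + 1 := by omega
        simp only [Function.comp, h3, List.getD_cons_succ]
      rw [hf, iht.2]
      simp [pvSplit_cons]

theorem foldl_add_map {a : Type} (f : a -> Int) (l : List a) (init : Int) :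
    l.foldl (fun acc k => acc + f k) init = init + (l.map f).sum := by
  induction l generalizing init with
  | nil => simp
  | cons k t ih => simp only [List.foldl_cons, List.map_cons, List.sum_cons, ih]; ring

theorem sum_map_mul (E : Int) (l : List Int) :
    (l.map (fun v => v * E)).sum = l.sum * E := by
  induction l with
  | nil => simp
  | cons x t ih => simp [ih, add_mul]

-- A's even-index loop over xs with body a + g (xs[i])
theorem loop_even (g : Int -> Int) (xs : List Int) (init : Int) :
    (PySem.List.pyRange 0 (PySem.List.len xs) 2).foldl
      (fun a i => a + g (PySem.List.pyGetD xs i 0)) init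
      = init + ((pvSplit xs).1.map g).sum := by
  rw [PySem.List.len_eq, pyRange2_zero, List.foldl_map]
  simp only [PySem.List.pyGetD_natCast]
  rw [foldl_add_map (fun k => g (xs.getD (2 * k) 0))]
  rw [show (List.range ((xs.length + 1) / 2)).map (fun k => g (xs.getD (2 * k) 0))
      = ((List.range ((xs.length + 1) / 2)).map (fun k => xs.getD (2 * k) 0)).map g by
    rw [List.map_map]; rfl]
  rw [(map_even_eq xs).1]

theorem loop_odd (g : Int -> Int) (xs : List Int) (init : Int) :
    (PySem.List.pyRange 1 (PySem.List.len xs) 2).foldl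
      (fun a i => a + g (PySem.List.pyGetD xs i 0)) init
      = init + ((pvSplit xs).2.map g).sum := by
  rw [PySem.List.len_eq, pyRange2_one, List.foldl_map]
  simp only [PySem.List.pyGetD_natCast]
  rw [foldl_add_map (fun k => g (xs.getD (2 * k + 1) 0))]
  rw [show (List.range (xs.length / 2)).map (fun k => g (xs.getD (2 * k + 1) 0))
      = ((List.range (xs.length / 2)).map (fun k => xs.getD (2 * k + 1) 0)).map g by
    rw [List.map_map]; rfl]
  rw [(map_even_eq xs).2]

theorem A_closed (cs rs : List Int) :
    white_black_areas cs rs =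
      ((pvSplit rs).1.sum * (pvSplit cs).1.sum + (pvSplit rs).2.sum * (pvSplit cs).2.sum,
       (pvSplit rs).1.sum * (pvSplit cs).2.sum + (pvSplit rs).2.sum * (pvSplit cs).1.sum) := by
  simp only [white_black_areas]
  rw [loop_even (fun v => v) cs 0, loop_odd (fun v => v) cs 0]
  simp only [List.map_id_fun', id, zero_add]
  rw [loop_even (fun v => v * (pvSplit cs).1.sum) rs 0,
      loop_odd (fun v => v * (pvSplit cs).2.sum) rs _,
      loop_even (fun v => v * (pvSplit cs).2.sum) rs 0,
      loop_odd (fun v => v * (pvSplit cs).1.sum) rs _]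
  simp only [sum_map_mul, zero_add]

-- ===== VERDICT (by name: the statement is the Claim_ definition above) =====
theorem white_black_areas_spec : Claim_equal_white_black_areas := by
  intro cs rs _
  unfold Spec_white_black_areas white_black_areas_alt
  rw [A_closed, pvEO_eq_split cs, pvEO_eq_split rs]
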